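-- pv_equiv track=rewrite | github.com/LackOfSkillz/DireEngine | tools/diretest/core/diff.py | _dict_delta
-- ===== SOURCE A (Python) =====
-- def _dict_delta(before, after):
--     before_map = dict(before or {})
--     after_map = dict(after or {})
--     changed = {}
--     for key in sorted(set(before_map) | set(after_map)):
--         if before_map.get(key) != after_map.get(key):
--             changed[key] = {
--                 "before": before_map.get(key),
--                 "after": after_map.get(key),
--             }
--     return changed
-- ===== SOURCE B (Python) =====
-- def _dict_delta(before, after):
--     merged = {}
--     for key, value in dict(before or {}).items():
--         merged[key] = (value, None)
--     for key, value in dict(after or {}).items():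
--         prior = merged[key][0] if key in merged else None
--         merged[key] = (prior, value)
--     return {
--         key: {"before": b, "after": a}
--         for key, (b, a) in sorted(merged.items(), key=lambda item: item[0])
--         if b != a
--     }
-- ===== Notes on version B (the rewrite author's own statement) =====
-- stated objective: alternative
-- what changed: Instead of building two separate dicts and probing both with .get for every key of their sorted set-union, B merges both inputs into one dict mapping each key to its (before, after) value pair in two direct passes, then emits the differing pairs in one sorted filter-comprehension.
import Mathlib
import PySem

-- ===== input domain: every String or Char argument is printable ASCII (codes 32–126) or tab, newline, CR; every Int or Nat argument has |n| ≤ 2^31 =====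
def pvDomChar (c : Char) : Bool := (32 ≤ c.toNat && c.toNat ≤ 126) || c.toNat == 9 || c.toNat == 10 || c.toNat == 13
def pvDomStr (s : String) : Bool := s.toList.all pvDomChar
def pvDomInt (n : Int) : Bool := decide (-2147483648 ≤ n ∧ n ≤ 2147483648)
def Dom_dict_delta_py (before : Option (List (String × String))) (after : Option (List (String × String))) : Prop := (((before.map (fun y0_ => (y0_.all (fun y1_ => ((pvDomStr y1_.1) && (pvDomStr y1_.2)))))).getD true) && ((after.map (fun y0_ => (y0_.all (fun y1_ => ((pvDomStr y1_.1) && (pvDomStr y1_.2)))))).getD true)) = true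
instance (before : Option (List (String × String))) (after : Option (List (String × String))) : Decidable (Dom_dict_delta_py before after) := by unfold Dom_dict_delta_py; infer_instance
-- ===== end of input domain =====

-- B merges both inputs into ONE dict of (before, after) pairs and emits the differing pairs via a
-- sorted filter-comprehension, instead of A's two dicts probed with .get over the sorted key-set union;
-- an alternative decomposition, same asymptotic cost.

-- ===== PORT A =====
def dict_delta_py (before : Option (List (String × String))) (after : Option (List (String × String))) : List (String × List (String × Option String)) :=
  let before_map := PySem.Dict.ofList (before.getD [])
  let after_map := PySem.Dict.ofList (after.getD [])
  let keys := PySem.List.sorted ((PySem.Set.ofList before_map.keys).union (PySem.Set.ofList after_map.keys)) (fun k => k)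
  let changed := keys.foldl (fun d key =>
      if before_map.get? key ≠ after_map.get? key then
        d.insert key [("before", before_map.get? key), ("after", after_map.get? key)]
      else d) PySem.Dict.empty
  changed.items

-- ===== PORT B =====
def dict_delta_py_alt (before : Option (List (String × String))) (after : Option (List (String × String))) : List (String × List (String × Option String)) :=
  let merged₁ := (PySem.Dict.ofList (before.getD [])).items.foldl
    (fun d kv => d.insert kv.1 ((some kv.2 : Option String), (none : Option String))) PySem.Dict.empty
  let merged := (PySem.Dict.ofList (after.getD [])).items.foldl
    (fun d kv => d.insert kv.1 ((match d.get? kv.1 with | some p => p.1 | none => none), some kv.2)) merged₁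
  ((PySem.List.sorted merged.items (fun item => item.1)).filter
      (fun item => item.2.1 ≠ item.2.2)).map
    (fun item => (item.1, [("before", item.2.1), ("after", item.2.2)]))

-- ===== PRECONDITION & SPEC =====
def Spec_dict_delta_py (before : Option (List (String × String))) (after : Option (List (String × String))) (out : List (String × List (String × Option String))) : Prop := out = dict_delta_py_alt before after
instance (before : Option (List (String × String))) (after : Option (List (String × String))) (out : List (String × List (String × Option String))) : Decidable (Spec_dict_delta_py before after out) := by unfold Spec_dict_delta_py; infer_instance

-- ===== CLAIM (what is proved, stated in full; the proofs are below) =====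
def Claim_equal_dict_delta_py : Prop := ∀ (before : Option (List (String × String))) (after : Option (List (String × String))), Dom_dict_delta_py before after → Spec_dict_delta_py before after (dict_delta_py before after)

-- ===== LEMMAS AND PROOFS =====


theorem pv_fold1_get? (l : List (String × String))
    (d : PySem.Dict String (Option String × Option String)) (k : String) :
    (l.foldl (fun d kv => d.insert kv.1 ((some kv.2 : Option String), (none : Option String))) d).get? k =
      match (PySem.Dict.ofList l).get? k with
      | some w => some (some w, none)
      | none => d.get? k := by
  induction l using List.reverseRecOn generalizing d with
  | nil => simp [PySem.Dict.ofList, PySem.Dict.update]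
  | append_singleton l p ih =>
    have hof : PySem.Dict.ofList (l ++ [p]) = (PySem.Dict.ofList l).insert p.1 p.2 := by
      simp [PySem.Dict.ofList, PySem.Dict.update, List.foldl_append]
    rw [List.foldl_append, hof, List.foldl_cons, List.foldl_nil]
    by_cases hk : k = p.1
    · subst hk
      simp [PySem.Dict.get?_insert_self]
    · rw [PySem.Dict.get?_insert_of_ne _ _ hk, PySem.Dict.get?_insert_of_ne _ _ hk, ih]

theorem pv_fold2_get? (l : List (String × String))
    (d : PySem.Dict String (Option String × Option String)) (k : String) :
    (l.foldl (fun d kv => d.insert kv.1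
        ((match d.get? kv.1 with | some p => p.1 | none => none), some kv.2)) d).get? k =
      match (PySem.Dict.ofList l).get? k with
      | some w => some ((match d.get? k with | some p => p.1 | none => none), some w)
      | none => d.get? k := by
  induction l using List.reverseRecOn generalizing d with
  | nil => simp [PySem.Dict.ofList, PySem.Dict.update]
  | append_singleton l p ih =>
    have hof : PySem.Dict.ofList (l ++ [p]) = (PySem.Dict.ofList l).insert p.1 p.2 := by
      simp [PySem.Dict.ofList, PySem.Dict.update, List.foldl_append]
    rw [List.foldl_append, hof, List.foldl_cons, List.foldl_nil]
    by_cases hk : k = p.1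
    · subst hk
      rw [PySem.Dict.get?_insert_self, PySem.Dict.get?_insert_self, ih]
      cases (PySem.Dict.ofList l).get? p.1 <;> cases d.get? p.1 <;> simp
    · rw [PySem.Dict.get?_insert_of_ne _ _ hk, PySem.Dict.get?_insert_of_ne _ _ hk, ih]

theorem pv_keys_ofList (l : List (String × String)) :
    (PySem.Dict.ofList l).keys = PySem.Set.ofList (l.map Prod.fst) := by
  rw [show PySem.Dict.ofList l = l.foldl (fun d p => d.insert p.1 p.2) PySem.Dict.empty from rfl]
  rw [PySem.Dict.keys_foldl_insert_key l Prod.fst (fun _ x => x.2)]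
  simp [PySem.Dict.keys_empty, PySem.Set.update_nil_left]

theorem pv_get?_ofList_eq_none_iff (l : List (String × String)) (k : String) :
    (PySem.Dict.ofList l).get? k = none ↔ k ∉ l.map Prod.fst := by
  rw [PySem.Dict.get?_eq_none_iff_not_mem_keys, pv_keys_ofList, PySem.Set.mem_ofList]

def pvMerged (b a : List (String × String)) : PySem.Dict String (Option String × Option String) :=
  (PySem.Dict.ofList a).items.foldl
    (fun d kv => d.insert kv.1 ((match d.get? kv.1 with | some p => p.1 | none => none), some kv.2))
    ((PySem.Dict.ofList b).items.foldl
      (fun d kv => d.insert kv.1 ((some kv.2 : Option String), (none : Option String))) PySem.Dict.empty)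

theorem pv_ofList_items (d : PySem.Dict String String) (h : d.keys.Nodup) :
    PySem.Dict.ofList d.items = d := by
  have h' : (d.items.map Prod.fst).Nodup := by simpa [PySem.Dict.keys] using h
  apply PySem.Dict.ext
  rw [show PySem.Dict.ofList d.items = d.items.foldl (fun e p => e.insert p.1 p.2) PySem.Dict.empty from rfl]
  rw [PySem.Dict.items_foldl_insert_fresh d.items Prod.fst Prod.snd PySem.Dict.empty
        (fun x _ => PySem.Dict.contains_empty x.1) h']
  simp [PySem.Dict.empty]

theorem pv_merged_get? (b a : List (String × String)) (k : String) :
    (pvMerged b a).get? k =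
      match (PySem.Dict.ofList a).get? k with
      | some w => some ((PySem.Dict.ofList b).get? k, some w)
      | none => match (PySem.Dict.ofList b).get? k with
                | some w => some (some w, none)
                | none => none := by
  unfold pvMerged
  rw [pv_fold2_get?, pv_fold1_get?,
      pv_ofList_items _ (PySem.Dict.nodup_keys_ofList a),
      pv_ofList_items _ (PySem.Dict.nodup_keys_ofList b)]
  simp [PySem.Dict.get?_empty]
  cases (PySem.Dict.ofList a).get? k <;> cases (PySem.Dict.ofList b).get? k <;> simp

theorem pv_merged_keys (b a : List (String × String)) :
    (pvMerged b a).keys = PySem.Set.update (PySem.Set.ofList (PySem.Dict.ofList b).keys) (PySem.Dict.ofList a).keys := by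
  unfold pvMerged
  rw [PySem.Dict.keys_foldl_insert_key, PySem.Dict.keys_foldl_insert_key]
  simp [PySem.Dict.empty, PySem.Set.update_nil_left, PySem.Dict.keys]

theorem pv_merged_keys_nodup (b a : List (String × String)) : (pvMerged b a).keys.Nodup := by
  unfold pvMerged
  exact PySem.Dict.nodup_keys_foldl_insert_key _ _ _ _
    (PySem.Dict.nodup_keys_foldl_insert_key _ _ _ _ PySem.Dict.nodup_keys_empty)

theorem pv_mem_merged_keys (b a : List (String × String)) (k : String) :
    k ∈ (pvMerged b a).keys ↔ k ∈ b.map Prod.fst ∨ k ∈ a.map Prod.fst := by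
  rw [pv_merged_keys, PySem.Set.mem_update, PySem.Set.mem_ofList, pv_keys_ofList,
      pv_keys_ofList, PySem.Set.mem_ofList, PySem.Set.mem_ofList]

theorem pv_merged_getD (b a : List (String × String)) (k : String) (hk : k ∈ (pvMerged b a).keys) :
    (pvMerged b a).getD k ((none : Option String), (none : Option String)) =
      ((PySem.Dict.ofList b).get? k, (PySem.Dict.ofList a).get? k) := by
  have hmem := (pv_mem_merged_keys b a k).1 hk
  have hsome : (pvMerged b a).get? k =
      some ((PySem.Dict.ofList b).get? k, (PySem.Dict.ofList a).get? k) := by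
    rw [pv_merged_get?]
    rcases hmem with hmb | hma
    · rcases Option.ne_none_iff_exists'.1 (fun h => (pv_get?_ofList_eq_none_iff b k).1 h hmb) with ⟨v, hv⟩
      rw [hv]
      cases (PySem.Dict.ofList a).get? k <;> simp
    · rcases Option.ne_none_iff_exists'.1 (fun h => (pv_get?_ofList_eq_none_iff a k).1 h hma) with ⟨v, hv⟩
      rw [hv]
  exact PySem.Dict.getD_of_get?_eq_some _ _ hsome

def pvKeys (b a : List (String × String)) : List String :=
  PySem.List.sorted (pvMerged b a).keys (fun k => k)

theorem pv_pvKeys_pairwise (b a : List (String × String)) : (pvKeys b a).Pairwise (· < ·) := by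
  have hle := PySem.List.sorted_pairwise (pvMerged b a).keys (fun k => k)
  have hnd : (pvKeys b a).Nodup :=
    (PySem.List.sorted_perm (pvMerged b a).keys (fun k => k) false).symm.nodup (pv_merged_keys_nodup b a)
  exact (hle.and hnd).imp fun h => lt_of_le_of_ne h.1 h.2

def pvOut (b a : List (String × String)) : List (String × List (String × Option String)) :=
  ((pvKeys b a).filter
      (fun k => decide ((PySem.Dict.ofList b).get? k ≠ (PySem.Dict.ofList a).get? k))).map
    (fun k => (k, [("before", (PySem.Dict.ofList b).get? k), ("after", (PySem.Dict.ofList a).get? k)]))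
theorem pv_A_eq (b a : List (String × String)) :
    dict_delta_py (some b) (some a) = pvOut b a := by
  show ((PySem.List.sorted ((PySem.Set.ofList (PySem.Dict.ofList b).keys).union
          (PySem.Set.ofList (PySem.Dict.ofList a).keys)) (fun k => k)).foldl
      (fun d key =>
        if (PySem.Dict.ofList b).get? key ≠ (PySem.Dict.ofList a).get? key then
          d.insert key [("before", (PySem.Dict.ofList b).get? key), ("after", (PySem.Dict.ofList a).get? key)]
        else d) PySem.Dict.empty).items = pvOut b a
  have hK : PySem.List.sorted ((PySem.Set.ofList (PySem.Dict.ofList b).keys).union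
      (PySem.Set.ofList (PySem.Dict.ofList a).keys)) (fun k => k) = pvKeys b a := by
    apply PySem.List.sorted_eq_sorted_of_perm _ _ _ (fun x y h => h)
    apply (List.perm_ext_iff_of_nodup
      (PySem.Set.nodup_union _ _ (PySem.Set.nodup_ofList _)) (pv_merged_keys_nodup b a)).2
    intro x
    simp [PySem.Set.mem_union, PySem.Set.mem_ofList, pv_keys_ofList, pv_mem_merged_keys]
  rw [hK]
  have hfun : (fun (d : PySem.Dict String (List (String × Option String))) key =>
        if (PySem.Dict.ofList b).get? key ≠ (PySem.Dict.ofList a).get? key then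
          d.insert key [("before", (PySem.Dict.ofList b).get? key), ("after", (PySem.Dict.ofList a).get? key)]
        else d)
      = (fun d key =>
        if (decide ((PySem.Dict.ofList b).get? key ≠ (PySem.Dict.ofList a).get? key)) = true then
          d.insert key [("before", (PySem.Dict.ofList b).get? key), ("after", (PySem.Dict.ofList a).get? key)]
        else d) := by
    funext d key; simp
  rw [hfun, ← List.foldl_filter]
  rw [PySem.Dict.items_foldl_insert_fresh
        (((pvKeys b a).filter _)) (fun k => k)
        (fun k => [("before", (PySem.Dict.ofList b).get? k), ("after", (PySem.Dict.ofList a).get? k)])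
        PySem.Dict.empty (fun x _ => PySem.Dict.contains_empty x)
        (by simpa using ((pv_pvKeys_pairwise b a).imp (fun h => ne_of_lt h)).filter _)]
  simp [pvOut, PySem.Dict.empty]

theorem pv_B_eq (b a : List (String × String)) :
    dict_delta_py_alt (some b) (some a) = pvOut b a := by
  show ((PySem.List.sorted (pvMerged b a).items (fun item => item.1)).filter
      (fun item => item.2.1 ≠ item.2.2)).map
    (fun item => (item.1, [("before", item.2.1), ("after", item.2.2)])) = pvOut b a
  rw [PySem.Dict.items_eq_map_keys (pvMerged b a) (pv_merged_keys_nodup b a)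
        ((none : Option String), (none : Option String))]
  have hsorted : PySem.List.sorted
      ((pvMerged b a).keys.map (fun k => (k, (pvMerged b a).getD k ((none : Option String), (none : Option String)))))
      (fun item => item.1)
    = (pvKeys b a).map (fun k => (k, (pvMerged b a).getD k ((none : Option String), (none : Option String)))) := by
    apply PySem.List.sorted_eq_of_perm_of_pairwise_lt
    · exact (PySem.List.sorted_perm (pvMerged b a).keys (fun k => k) false).map _
    · rw [List.pairwise_map]
      exact pv_pvKeys_pairwise b a
  rw [hsorted, List.filter_map, List.map_map]
  unfold pvOut
  have hfil : (pvKeys b a).filter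
        ((fun item => decide (item.2.1 ≠ item.2.2)) ∘
          (fun k => (k, (pvMerged b a).getD k ((none : Option String), (none : Option String)))))
      = (pvKeys b a).filter
        (fun k => decide ((PySem.Dict.ofList b).get? k ≠ (PySem.Dict.ofList a).get? k)) := by
    apply List.filter_congr
    intro k hkK
    have hk : k ∈ (pvMerged b a).keys := (PySem.List.mem_sorted _ _ _ _).1 hkK
    simp [Function.comp, pv_merged_getD b a k hk]
  rw [hfil]
  apply List.map_congr_left
  intro k hkF
  have hkK : k ∈ pvKeys b a := List.mem_of_mem_filter hkF
  have hk : k ∈ (pvMerged b a).keys := (PySem.List.mem_sorted _ _ _ _).1 hkK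
  simp [Function.comp, pv_merged_getD b a k hk]

-- ===== VERDICT (by name: the statement is the Claim_ definition above) =====
theorem dict_delta_py_spec : Claim_equal_dict_delta_py := by
  intro before after _
  unfold Spec_dict_delta_py
  cases before <;> cases after <;>
    exact (pv_A_eq _ _).trans (pv_B_eq _ _).symm
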